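-- pv_equiv track=rewrite | github.com/bspoloo/SIS420-012024 | Ejercicios en clase/Ejercicio1.py | findAandB
-- ===== SOURCE A (Python) =====
-- def findAandB(min, max, feacture, label):
--     a = 0;
--     b= 0;
--     for i in range(min,max):
--
--         for j in range(min,max):
--
--             valor = j + (i*feacture)
--             if valor <= label:
--                 result = valor;
--                 a=j;
--                 b=i;
--     return [a,b];
-- ===== SOURCE B (Python) =====
-- def findAandB(min, max, feacture, label):
--     # Loop-free closed form: largest valid i, then largest valid j.
--     if min >= max:
--         return [0, 0]
--     hi = max - 1
--     if feacture > 0: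
--         b = (label - min) // feacture
--         if b > hi:
--             b = hi
--         if b < min:
--             return [0, 0]
--     else:
--         if min + hi * feacture > label:
--             return [0, 0]
--         b = hi
--     a = label - b * feacture
--     if a > hi:
--         a = hi
--     return [a, b]
-- ===== Notes on version B (the rewrite author's own statement) =====
-- stated objective: alternative
-- what changed: Replaced the double loop over range(min,max) with a loop-free closed form: the largest valid i via floor division (or max-1 when feacture <= 0), then the largest valid j by clamping label - i*feacture to max-1.
import Mathlib
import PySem

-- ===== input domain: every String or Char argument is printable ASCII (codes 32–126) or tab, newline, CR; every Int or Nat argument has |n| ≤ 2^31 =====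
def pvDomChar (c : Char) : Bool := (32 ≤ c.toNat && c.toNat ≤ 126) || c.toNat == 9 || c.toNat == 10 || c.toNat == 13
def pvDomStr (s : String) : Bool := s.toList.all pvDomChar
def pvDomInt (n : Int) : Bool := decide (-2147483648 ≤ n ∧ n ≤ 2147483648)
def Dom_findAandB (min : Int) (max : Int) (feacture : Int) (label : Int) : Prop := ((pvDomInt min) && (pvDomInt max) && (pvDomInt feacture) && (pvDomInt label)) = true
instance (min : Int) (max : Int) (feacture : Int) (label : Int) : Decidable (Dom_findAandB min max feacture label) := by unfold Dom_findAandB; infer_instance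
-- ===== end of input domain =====

-- B replaces A's double loop by a loop-free closed form (floor division + clamping).

-- ===== PORT A =====
def findAandB (min : Int) (max : Int) (feacture : Int) (label : Int) : List Int :=
  let st := (PySem.List.pyRange min max 1).foldl (fun (ab : Int × Int) i =>
    (PySem.List.pyRange min max 1).foldl (fun (ab : Int × Int) j =>
      let valor := j + i * feacture
      if valor ≤ label then (j, i) else ab) ab) (0, 0)
  [st.1, st.2]

-- ===== PORT B =====
def findAandB_alt (min : Int) (max : Int) (feacture : Int) (label : Int) : List Int :=
  if min ≥ max then [0, 0]
  else
    let hi := max - 1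
    if feacture > 0 then
      let b0 := PySem.Int.floordiv (label - min) feacture
      let b := if b0 > hi then hi else b0
      if b < min then [0, 0]
      else
        let a0 := label - b * feacture
        [if a0 > hi then hi else a0, b]
    else
      if min + hi * feacture > label then [0, 0]
      else
        let a0 := label - hi * feacture
        [if a0 > hi then hi else a0, hi]

-- ===== PRECONDITION & SPEC =====
def Spec_findAandB (min : Int) (max : Int) (feacture : Int) (label : Int) (out : List Int) : Prop := out = findAandB_alt min max feacture label
instance (min : Int) (max : Int) (feacture : Int) (label : Int) (out : List Int) : Decidable (Spec_findAandB min max feacture label out) := by unfold Spec_findAandB; infer_instance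

-- ===== CLAIM (what is proved, stated in full; the proofs are below) =====
def Claim_equal_findAandB : Prop := ∀ (min : Int) (max : Int) (feacture : Int) (label : Int), Dom_findAandB min max feacture label → Spec_findAandB min max feacture label (findAandB min max feacture label)

-- ===== LEMMAS AND PROOFS =====

-- Inner loop: last j in [m, mx) with j + i*f ≤ l, i.e. (min (mx-1) (l - i*f), i) when one exists.
theorem pv_inner (mx i f l : Int) : ∀ (m : Int) (ab : Int × Int),
    (PySem.List.pyRange m mx 1).foldl (fun (ab : Int × Int) j =>
      let valor := j + i * f
      if valor ≤ l then (j, i) else ab) ab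
    = if m < mx ∧ m + i * f ≤ l then (Min.min (mx - 1) (l - i * f), i) else ab := by
  intro m
  by_cases hlt : m < mx
  · have hterm : (mx - (m + 1)).toNat < (mx - m).toNat := by omega
    intro ab
    rw [PySem.List.pyRange_one_cons hlt, List.foldl_cons, pv_inner mx i f l (m + 1)]
    simp only []
    by_cases hp : m + i * f ≤ l
    · simp only [if_pos hp]
      by_cases h2 : (m + 1) < mx ∧ (m + 1) + i * f ≤ l
      · rw [if_pos h2, if_pos ⟨hlt, hp⟩]
      · rw [if_neg h2, if_pos ⟨hlt, hp⟩]
        have : Min.min (mx - 1) (l - i * f) = m := by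
          rcases not_and_or.mp h2 with h | h
          · omega
          · omega
        rw [this]
    · simp only [if_neg hp]
      have h2 : ¬ ((m + 1) < mx ∧ (m + 1) + i * f ≤ l) := by omega
      rw [if_neg h2, if_neg (by omega : ¬ (m < mx ∧ m + i * f ≤ l))]
  · intro ab
    rw [PySem.List.pyRange_one_eq_nil (by omega), List.foldl_nil,
        if_neg (by omega : ¬ (m < mx ∧ m + i * f ≤ l))]
termination_by m => (mx - m).toNat

-- After pv_inner, the outer loop is a fold of 'if mn < mx ∧ mn + i*f ≤ l then (jmax i, i) else ab'.
-- feacture ≤ 0 case: the condition is monotone in i, so the last i of the range wins iff it satisfies it.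
theorem pv_outer_nonpos (mn mx f l : Int) (hf : f ≤ 0) : ∀ (m : Int) (ab : Int × Int), mn ≤ m →
    (PySem.List.pyRange m mx 1).foldl (fun (ab : Int × Int) i =>
      if mn < mx ∧ mn + i * f ≤ l then (Min.min (mx - 1) (l - i * f), i) else ab) ab
    = if m < mx ∧ mn + (mx - 1) * f ≤ l then (Min.min (mx - 1) (l - (mx - 1) * f), mx - 1) else ab := by
  intro m
  by_cases hlt : m < mx
  · have hterm : (mx - (m + 1)).toNat < (mx - m).toNat := by omega
    intro ab hm
    rw [PySem.List.pyRange_one_cons hlt, List.foldl_cons, pv_outer_nonpos mn mx f l hf (m + 1) _ (by omega)]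
    by_cases hg : mn + (mx - 1) * f ≤ l
    · by_cases h2 : m + 1 < mx
      · rw [if_pos ⟨h2, hg⟩, if_pos ⟨hlt, hg⟩]
      · have hme : m = mx - 1 := by omega
        have hp : mn < mx ∧ mn + m * f ≤ l := ⟨by omega, by rw [hme]; exact hg⟩
        rw [if_neg (by omega : ¬ (m + 1 < mx ∧ mn + (mx - 1) * f ≤ l)), if_pos hp,
            if_pos ⟨hlt, hg⟩, hme]
    · -- ¬ p (mx-1) and monotonicity give ¬ p m
      have hmono : (mx - 1) * f ≤ m * f := mul_le_mul_of_nonpos_right (by omega) hf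
      have hpm : ¬ (mn < mx ∧ mn + m * f ≤ l) := by
        rintro ⟨-, h⟩; exact hg (by omega)
      rw [if_neg (by tauto : ¬ (m + 1 < mx ∧ mn + (mx - 1) * f ≤ l)), if_neg hpm,
          if_neg (by tauto : ¬ (m < mx ∧ mn + (mx - 1) * f ≤ l))]
  · intro ab hm
    rw [PySem.List.pyRange_one_eq_nil (by omega), List.foldl_nil, if_neg (by tauto)]
termination_by m => (mx - m).toNat

-- feacture > 0 case: the condition is 'i ≤ B' with B = (l - mn) // f, so the winner is min (mx-1) B.
theorem pv_outer_pos (mn mx f l : Int) (hf : 0 < f) : ∀ (m : Int) (ab : Int × Int), mn ≤ m →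
    (PySem.List.pyRange m mx 1).foldl (fun (ab : Int × Int) i =>
      if mn < mx ∧ mn + i * f ≤ l then (Min.min (mx - 1) (l - i * f), i) else ab) ab
    = if m < mx ∧ m ≤ PySem.Int.floordiv (l - mn) f then
        (Min.min (mx - 1) (l - (Min.min (mx - 1) (PySem.Int.floordiv (l - mn) f)) * f),
         Min.min (mx - 1) (PySem.Int.floordiv (l - mn) f)) else ab := by
  intro m
  by_cases hlt : m < mx
  · have hterm : (mx - (m + 1)).toNat < (mx - m).toNat := by omega
    intro ab hm
    have hB : ∀ i : Int, (i ≤ PySem.Int.floordiv (l - mn) f) ↔ mn + i * f ≤ l := by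
      intro i
      rw [PySem.Int.floordiv, Int.fdiv_eq_ediv, if_pos (Or.inl (le_of_lt hf)), sub_zero,
          Int.le_ediv_iff_mul_le hf]
      omega
    rw [PySem.List.pyRange_one_cons hlt, List.foldl_cons,
        pv_outer_pos mn mx f l hf (m + 1) _ (by omega)]
    set B := PySem.Int.floordiv (l - mn) f with hBdef
    by_cases hp : m ≤ B
    · by_cases h2 : m + 1 < mx ∧ m + 1 ≤ B
      · rw [if_pos h2, if_pos (show m < mx ∧ m ≤ B from ⟨hlt, hp⟩)]
      · rw [if_neg h2,
            if_pos (show mn < mx ∧ mn + m * f ≤ l from ⟨by omega, (hB m).mp hp⟩),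
            if_pos (show m < mx ∧ m ≤ B from ⟨hlt, hp⟩)]
        have hmin : Min.min (mx - 1) B = m := by
          rcases not_and_or.mp h2 with h | h <;> omega
        rw [hmin]
    · rw [if_neg (show ¬ (m + 1 < mx ∧ m + 1 ≤ B) from by omega),
          if_neg (show ¬ (mn < mx ∧ mn + m * f ≤ l) from by rw [← hB m]; tauto),
          if_neg (show ¬ (m < mx ∧ m ≤ B) from by tauto)]
  · intro ab hm
    rw [PySem.List.pyRange_one_eq_nil (by omega), List.foldl_nil, if_neg (by tauto)]
termination_by m => (mx - m).toNat

-- ===== VERDICT (by name: the statement is the Claim_ definition above) =====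
theorem findAandB_spec : Claim_equal_findAandB := by
  intro mn mx f l _
  unfold Spec_findAandB findAandB findAandB_alt
  have hinner : ∀ (ab : Int × Int) (i : Int),
      (PySem.List.pyRange mn mx 1).foldl (fun (ab : Int × Int) j =>
        let valor := j + i * f
        if valor ≤ l then (j, i) else ab) ab
      = if mn < mx ∧ mn + i * f ≤ l then (Min.min (mx - 1) (l - i * f), i) else ab := by
    intro ab i; exact pv_inner mx i f l mn ab
  simp only [hinner]
  by_cases hmm : mn ≥ mx
  · rw [if_pos hmm]
    have : PySem.List.pyRange mn mx 1 = [] := PySem.List.pyRange_one_eq_nil (by omega)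
    rw [this, List.foldl_nil]
  · rw [if_neg hmm]
    by_cases hf : f > 0
    · rw [if_pos hf, pv_outer_pos mn mx f l hf mn (0, 0) le_rfl]
      set B := PySem.Int.floordiv (l - mn) f with hBdef
      by_cases hc : mn ≤ B
      · rw [if_pos (show mn < mx ∧ mn ≤ B from ⟨by omega, hc⟩)]
        have hb : (if B > mx - 1 then mx - 1 else B) = Min.min (mx - 1) B := by
          rcases le_total B (mx - 1) with h | h <;> simp [Int.min_def] <;> omega
        rw [if_neg (by rw [hb]; omega : ¬ ((if B > mx - 1 then mx - 1 else B) < mn))]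
        have ha : (if l - (if B > mx - 1 then mx - 1 else B) * f > mx - 1 then mx - 1
                   else l - (if B > mx - 1 then mx - 1 else B) * f)
                  = Min.min (mx - 1) (l - (Min.min (mx - 1) B) * f) := by
          rw [hb]
          rcases le_total (l - Min.min (mx - 1) B * f) (mx - 1) with h | h <;>
            simp [Int.min_def] <;> omega
        rw [ha, hb]
      · rw [if_neg (show ¬ (mn < mx ∧ mn ≤ B) from by tauto)]
        have hb : (if B > mx - 1 then mx - 1 else B) = B := by
          rw [if_neg (by omega)]
        rw [hb, if_pos (by omega : B < mn)]
    · rw [if_neg hf, pv_outer_nonpos mn mx f l (by omega) mn (0, 0) le_rfl]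
      by_cases hg : mn + (mx - 1) * f ≤ l
      · rw [if_pos ⟨by omega, hg⟩, if_neg (by omega : ¬ (mn + (mx - 1) * f > l))]
        have ha : (if l - (mx - 1) * f > mx - 1 then mx - 1 else l - (mx - 1) * f)
                  = Min.min (mx - 1) (l - (mx - 1) * f) := by
          rcases le_total (l - (mx - 1) * f) (mx - 1) with h | h <;>
            simp [Int.min_def] <;> omega
        rw [ha]
      · rw [if_neg (by tauto : ¬ (mn < mx ∧ mn + (mx - 1) * f ≤ l)),
            if_pos (by omega : mn + (mx - 1) * f > l)]
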